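-- pv_equiv track=rewrite | github.com/Lxkasmehl/TurtleTracker | backend/sheets/columns.py | compute_insert_index_for_missing_column
-- ===== SOURCE A (Python) =====
-- from typing import Any, Dict, List, Sequence, Tuple
--
-- CANONICAL_COLUMN_ORDER: Tuple[str, ...] = (
--     'Primary ID',
--     'Frequency',
--     'ID',
--     'Pit?',
--     'Plastron Picture in Archive?',
--     'Carapace Picture in Archive?',
--     'Adopted?',
--     'iButton?',
--     'Date DNA Extracted?',
--     'Date 1st found',
--     'Species',
--     'Name',
--     'Sex',
--     'iButton Last set',
--     'Last Assay Date',
--     'Dates refound',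
--     'Specific Location',
--     'General Location',
--     'Location',
--     'Cow Interactions?',
--     'Health Status',
--     'Deceased?',
--     'Notes',
--     'Transmitter put on by',
--     'Transmitter On Date',
--     'Transmitter Type',
--     'Transmitter lifespan',
--     'Radio Replace Date',
--     'OLD Frequencies',
--     'Flesh Flies?',
--     'Mass (g)',
--     'CCL',
--     'Cflat',
--     'Cwidth',
--     'PlasCL',
--     'Pflat',
--     'P1',
--     'P2',
--     'Pwidth',
--     'DomeHeight',
-- )
--
-- def compute_insert_index_for_missing_column(
--     headers_ordered: Sequence[str],
--     missing_header: str,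
--     canonical_order: Sequence[str] = CANONICAL_COLUMN_ORDER,
-- ) -> int:
--     """
--     0-based index where a new column with ``missing_header`` should be inserted
--     so it stays consistent with canonical_order relative to existing headers.
--     """
--     normalized = [((h or '').strip()) for h in headers_ordered]
--     header_set = set(normalized)
--     try:
--         pos = canonical_order.index(missing_header)
--     except ValueError:
--         return len(normalized)
--
--     anchor_before_idx = -1
--     for j in range(pos - 1, -1, -1):
--         h = canonical_order[j]
--         if h in header_set:
--             anchor_before_idx = normalized.index(h)
--             break
--
--     anchor_after_idx = None
--     for j in range(pos + 1, len(canonical_order)):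
--         h = canonical_order[j]
--         if h in header_set:
--             anchor_after_idx = normalized.index(h)
--             break
--
--     if anchor_before_idx >= 0:
--         return anchor_before_idx + 1
--     if anchor_after_idx is not None:
--         return anchor_after_idx
--     return len(normalized)
-- ===== SOURCE B (Python) =====
-- from typing import Sequence, Tuple
--
-- CANONICAL_COLUMN_ORDER: Tuple[str, ...] = (
--     'Primary ID', 'Frequency', 'ID', 'Pit?', 'Plastron Picture in Archive?',
--     'Carapace Picture in Archive?', 'Adopted?', 'iButton?', 'Date DNA Extracted?',
--     'Date 1st found', 'Species', 'Name', 'Sex', 'iButton Last set', 'Last Assay Date',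
--     'Dates refound', 'Specific Location', 'General Location', 'Location',
--     'Cow Interactions?', 'Health Status', 'Deceased?', 'Notes', 'Transmitter put on by',
--     'Transmitter On Date', 'Transmitter Type', 'Transmitter lifespan',
--     'Radio Replace Date', 'OLD Frequencies', 'Flesh Flies?', 'Mass (g)', 'CCL', 'Cflat',
--     'Cwidth', 'PlasCL', 'Pflat', 'P1', 'P2', 'Pwidth', 'DomeHeight',
-- )
--
-- def compute_insert_index_for_missing_column(
--     headers_ordered: Sequence[str],
--     missing_header: str,
--     canonical_order: Sequence[str] = CANONICAL_COLUMN_ORDER,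
-- ) -> int:
--     normalized = [((h or '').strip()) for h in headers_ordered]
--     rank = {}
--     for i, h in enumerate(canonical_order):
--         rank.setdefault(h, i)
--     pos = rank.get(missing_header)
--     if pos is None:
--         return len(normalized)
--     best_before = None  # (index, rank): largest rank below pos, first index
--     best_after = None   # (index, rank): smallest rank above pos, first index
--     for i, h in enumerate(normalized):
--         r = rank.get(h)
--         if r is None or r == pos:
--             continue
--         if r < pos:
--             if best_before is None or r > best_before[1]:
--                 best_before = (i, r)
--         else:
--             if best_after is None or r < best_after[1]:
--                 best_after = (i, r)
--     if best_before is not None: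
--         return best_before[0] + 1
--     if best_after is not None:
--         return best_after[0]
--     return len(normalized)
-- ===== Notes on version B (the rewrite author's own statement) =====
-- stated objective: alternative
-- what changed: Pre_ excludes inputs whose missing_header lies in a canonical_order list with duplicate entries, where A's positional scans vs B's first-occurrence ranks are both defensible; elsewhere B replaces A's two directional scans over canonical_order (each followed by normalized.index) with a rank dict built once and a single pass over the normalized headers tracking the best before-anchor (max rank below pos, first index) and best after-anchor (min rank above pos, first index).
-- outside the precondition, e.g. on compute_insert_index_for_missing_column(['c'], 'c', ['c', 'c', '', 'a']): A returns 0, B returns 1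
import Mathlib
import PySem

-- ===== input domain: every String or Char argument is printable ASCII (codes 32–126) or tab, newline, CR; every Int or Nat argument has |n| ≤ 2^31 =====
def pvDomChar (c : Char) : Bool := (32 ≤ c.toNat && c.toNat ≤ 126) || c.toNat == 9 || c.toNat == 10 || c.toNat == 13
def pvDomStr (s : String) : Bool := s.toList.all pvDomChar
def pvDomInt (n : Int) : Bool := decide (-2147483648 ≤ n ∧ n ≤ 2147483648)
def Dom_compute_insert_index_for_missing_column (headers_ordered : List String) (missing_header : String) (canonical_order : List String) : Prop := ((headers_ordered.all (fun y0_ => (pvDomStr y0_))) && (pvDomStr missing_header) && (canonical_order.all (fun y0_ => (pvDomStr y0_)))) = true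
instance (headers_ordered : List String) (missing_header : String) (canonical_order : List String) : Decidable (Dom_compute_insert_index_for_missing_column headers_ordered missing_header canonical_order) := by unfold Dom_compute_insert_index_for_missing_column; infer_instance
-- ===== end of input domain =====

-- B replaces A's two directional scans over canonical_order (each ending in normalized.index)
-- by a rank dictionary built once plus a single pass over the normalized headers (objective: alternative).

-- ===== PORT A =====
-- literal transliteration of A; each scan loop (break at first hit) is a helper.
-- The `.getD 0` after index? is unreachable: the found header is a member of normalized.
def pvAnchorBeforeA (normalized : List String) (header_set : PySem.Set String)
    (canonical_order : List String) (pos : Nat) : Int :=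
  match (PySem.List.pyRange ((pos : Int) - 1) (-1) (-1)).find?
      (fun j => PySem.Set.contains header_set (PySem.List.pyGetD canonical_order j "")) with
  | none => -1
  | some j => (((PySem.List.index? normalized (PySem.List.pyGetD canonical_order j "")).getD 0 : Nat) : Int)

def pvAnchorAfterA (normalized : List String) (header_set : PySem.Set String)
    (canonical_order : List String) (pos : Nat) : Option Int :=
  match (PySem.List.pyRange ((pos : Int) + 1) (PySem.List.len canonical_order) 1).find?
      (fun j => PySem.Set.contains header_set (PySem.List.pyGetD canonical_order j "")) with
  | none => none
  | some j => some (((PySem.List.index? normalized (PySem.List.pyGetD canonical_order j "")).getD 0 : Nat) : Int)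

def compute_insert_index_for_missing_column (headers_ordered : List String) (missing_header : String) (canonical_order : List String) : Int :=
  let normalized := headers_ordered.map (fun h => PySem.Str.strip h)
  let header_set : PySem.Set String := PySem.Set.ofList normalized
  match PySem.List.index? canonical_order missing_header with
  | none => PySem.List.len normalized
  | some pos =>
    let anchor_before_idx : Int := pvAnchorBeforeA normalized header_set canonical_order pos
    let anchor_after_idx : Option Int := pvAnchorAfterA normalized header_set canonical_order pos
    if anchor_before_idx ≥ 0 then anchor_before_idx + 1
    else match anchor_after_idx with
      | some k => k
      | none => PySem.List.len normalized

-- ===== PORT B =====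
-- one step of B's single pass: update (best_before, best_after) from (index, header)
def pvStepB (rank : PySem.Dict String Int) (pos : Int)
    (st : Option (Int × Int) × Option (Int × Int)) (p : Int × String) :
    Option (Int × Int) × Option (Int × Int) :=
  match rank.get? p.2 with
  | none => st
  | some r =>
    if r == pos then st
    else if r < pos then
      match st.1 with
      | none => (some (p.1, r), st.2)
      | some bb => if r > bb.2 then (some (p.1, r), st.2) else st
    else
      match st.2 with
      | none => (st.1, some (p.1, r))
      | some ba => if r < ba.2 then (st.1, some (p.1, r)) else st

def compute_insert_index_for_missing_column_alt (headers_ordered : List String) (missing_header : String) (canonical_order : List String) : Int :=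
  let normalized := headers_ordered.map (fun h => PySem.Str.strip h)
  let rank : PySem.Dict String Int :=
    (PySem.List.enumerate canonical_order).foldl
      (fun d p => d.setdefault p.2 p.1) PySem.Dict.empty
  match rank.get? missing_header with
  | none => PySem.List.len normalized
  | some pos =>
    let res := (PySem.List.enumerate normalized).foldl (pvStepB rank pos) (none, none)
    match res.1 with
    | some bb => bb.1 + 1
    | none =>
      match res.2 with
      | some ba => ba.1
      | none => PySem.List.len normalized

-- ===== PRECONDITION & SPEC =====
-- Pre_ excludes inputs where missing_header is in a canonical_order list with repeated
-- entries: there A's scan over canonical positions and B's first-occurrence ranking are both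
-- defensible readings of a malformed canonical order (the real CANONICAL_COLUMN_ORDER is
-- duplicate-free).
def Pre_compute_insert_index_for_missing_column (headers_ordered : List String) (missing_header : String) (canonical_order : List String) : Prop :=
  missing_header ∉ canonical_order ∨ canonical_order.Nodup
instance (headers_ordered : List String) (missing_header : String) (canonical_order : List String) : Decidable (Pre_compute_insert_index_for_missing_column headers_ordered missing_header canonical_order) := by unfold Pre_compute_insert_index_for_missing_column; infer_instance

def pvWitness_compute_insert_index_for_missing_column : List String × String × List String :=
  (["ID ", "Name", "Sex"], "Species", ["ID", "Species", "Name", "Sex"])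

def Spec_compute_insert_index_for_missing_column (headers_ordered : List String) (missing_header : String) (canonical_order : List String) (out : Int) : Prop := out = compute_insert_index_for_missing_column_alt headers_ordered missing_header canonical_order
instance (headers_ordered : List String) (missing_header : String) (canonical_order : List String) (out : Int) : Decidable (Spec_compute_insert_index_for_missing_column headers_ordered missing_header canonical_order out) := by unfold Spec_compute_insert_index_for_missing_column; infer_instance

-- ===== CLAIM (what is proved, stated in full; the proofs are below) =====
def Claim_equal_compute_insert_index_for_missing_column : Prop := ∀ (headers_ordered : List String) (missing_header : String) (canonical_order : List String), Dom_compute_insert_index_for_missing_column headers_ordered missing_header canonical_order → Pre_compute_insert_index_for_missing_column headers_ordered missing_header canonical_order → Spec_compute_insert_index_for_missing_column headers_ordered missing_header canonical_order (compute_insert_index_for_missing_column headers_ordered missing_header canonical_order)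

-- ===== LEMMAS AND PROOFS =====

theorem pvRank_aux (l : List String) (s : Int) (d : PySem.Dict String Int) (x : String) :
    ((PySem.List.enumerate l s).foldl (fun d p => d.setdefault p.2 p.1) d).get? x
      = if d.contains x then d.get? x
        else (PySem.List.index? l x).map (fun n => (s + (n : Int))) := by
  induction l generalizing s d with
  | nil =>
    simp [PySem.List.enumerate]
    intro h
    exact (PySem.Dict.get?_eq_none_iff_contains d x).mpr (by simpa using h)
  | cons h t ih =>
    rw [PySem.List.enumerate_cons, List.foldl_cons, ih]
    by_cases hx : x = h
    · subst hx
      by_cases hc : d.contains x = true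
      · rw [PySem.Dict.setdefault_of_contains d s hc]
        simp [hc]
      · have hc' : d.contains x = false := by simpa using hc
        rw [PySem.Dict.setdefault_of_not_contains d s hc']
        rw [if_pos (PySem.Dict.contains_insert_self d x s), PySem.Dict.get?_insert_self,
          if_neg (by simp [hc']), PySem.List.index?_cons_self]
        simp
    · rw [PySem.Dict.get?_setdefault_of_ne d s hx]
      rw [PySem.Dict.contains_setdefault]
      have : (x == h) = false := by simpa using hx
      rw [this]
      simp only [Bool.false_or]
      by_cases hc : d.contains x = true
      · simp [hc]
      · have hc' : d.contains x = false := by simpa using hc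
        simp only [hc']
        rw [PySem.List.index?_cons_of_ne t (Ne.symm hx)]
        cases PySem.List.index? t x <;> simp <;> ring

theorem pvRank_get (c : List String) (x : String) :
    ((PySem.List.enumerate c 0).foldl (fun d p => d.setdefault p.2 p.1) PySem.Dict.empty).get? x
      = (PySem.List.index? c x).map (fun n => ((n : Nat) : Int)) := by
  rw [pvRank_aux]
  simp only [PySem.Dict.contains_empty, PySem.Dict.get?_empty, if_false, Bool.false_eq_true]
  cases PySem.List.index? c x <;> simp

def pvCombB (a b : Option (Int × Int)) : Option (Int × Int) :=
  match a, b with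
  | none, b => b
  | a, none => a
  | some p, some q => if q.2 > p.2 then some q else some p

def pvCombA (a b : Option (Int × Int)) : Option (Int × Int) :=
  match a, b with
  | none, b => b
  | a, none => a
  | some p, some q => if q.2 < p.2 then some q else some p

theorem pvCombB_assoc (a b c : Option (Int × Int)) :
    pvCombB (pvCombB a b) c = pvCombB a (pvCombB b c) := by
  rcases a with _ | p <;> rcases b with _ | q <;> rcases c with _ | w <;>
    simp only [pvCombB] <;> split_ifs <;>
      simp only [pvCombB] <;> split_ifs <;> first | rfl | omega

theorem pvCombA_assoc (a b c : Option (Int × Int)) :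
    pvCombA (pvCombA a b) c = pvCombA a (pvCombA b c) := by
  rcases a with _ | p <;> rcases b with _ | q <;> rcases c with _ | w <;>
    simp only [pvCombA] <;> split_ifs <;>
      simp only [pvCombA] <;> split_ifs <;> first | rfl | omega

def pvCandB (c : List String) (pos : Int) (p : Int × String) : Option (Int × Int) :=
  match PySem.List.index? c p.2 with
  | none => none
  | some rn =>
    let r : Int := (rn : Int)
    if r == pos then none else if r < pos then some (p.1, r) else none

def pvCandA (c : List String) (pos : Int) (p : Int × String) : Option (Int × Int) :=
  match PySem.List.index? c p.2 with
  | none => none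
  | some rn =>
    let r : Int := (rn : Int)
    if r == pos then none else if r < pos then none else some (p.1, r)

theorem pvStepB_eq (c : List String) (d : PySem.Dict String Int)
    (hd : ∀ x, d.get? x = (PySem.List.index? c x).map (fun n => ((n : Nat) : Int)))
    (pos : Int) (st : Option (Int × Int) × Option (Int × Int)) (p : Int × String) :
    pvStepB d pos st p = (pvCombB st.1 (pvCandB c pos p), pvCombA st.2 (pvCandA c pos p)) := by
  obtain ⟨a, b⟩ := st
  simp only [pvStepB, pvCandB, pvCandA, hd p.2]
  cases hr : PySem.List.index? c p.2 with
  | none => cases a <;> cases b <;> rfl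
  | some rn =>
    simp only [Option.map_some]
    by_cases h1 : ((rn : Int) == pos) = true
    · simp only [h1, if_true]
      cases a <;> cases b <;> rfl
    · rw [if_neg h1, if_neg h1, if_neg h1]
      by_cases h2 : (rn : Int) < pos
      · simp only [h2, if_true]
        cases a with
        | none => cases b <;> simp [pvCombB, pvCombA]
        | some bb =>
          by_cases h3 : (rn : Int) > bb.2 <;>
            cases b <;> simp [pvCombB, pvCombA, h3]
      · simp only [h2, if_false]
        cases b with
        | none => cases a <;> simp [pvCombB, pvCombA]
        | some ba =>
          by_cases h3 : (rn : Int) < ba.2 <;>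
            cases a <;> simp [pvCombB, pvCombA, h3]

def pvBestB (c : List String) (pos : Nat) : List String → Option (Nat × Nat)
  | [] => none
  | h :: t =>
    let rest := (pvBestB c pos t).map (fun q => (q.1 + 1, q.2))
    match PySem.List.index? c h with
    | none => rest
    | some r =>
      if r < pos then
        match rest with
        | none => some (0, r)
        | some q => if q.2 > r then some q else some (0, r)
      else rest

def pvBestA (c : List String) (pos : Nat) : List String → Option (Nat × Nat)
  | [] => none
  | h :: t =>
    let rest := (pvBestA c pos t).map (fun q => (q.1 + 1, q.2))
    match PySem.List.index? c h with
    | none => rest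
    | some r =>
      if pos < r then
        match rest with
        | none => some (0, r)
        | some q => if q.2 < r then some q else some (0, r)
      else rest

def pvMapB (c : List String) (pos : Nat) (N : List String) (s : Int) : Option (Int × Int) :=
  (pvBestB c pos N).map (fun q => ((s + (q.1 : Int) : Int), ((q.2 : Int) : Int)))

def pvMapA (c : List String) (pos : Nat) (N : List String) (s : Int) : Option (Int × Int) :=
  (pvBestA c pos N).map (fun q => ((s + (q.1 : Int) : Int), ((q.2 : Int) : Int)))

theorem pvBridgeB (c : List String) (pos : Nat) (h : String) (t : List String) (s : Int) :
    pvMapB c pos (h :: t) s = pvCombB (pvCandB c (pos : Int) (s, h)) (pvMapB c pos t (s + 1)) := by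
  simp only [pvMapB, pvBestB, pvCandB]
  cases hidx : PySem.List.index? c h with
  | none =>
    cases pvBestB c pos t <;> simp [pvCombB] <;> omega
  | some r =>
    dsimp only
    by_cases h1 : r < pos
    · have hne : ¬ (((r : Nat) : Int) == (pos : Int)) = true := by simp; omega
      rw [if_pos h1, if_neg hne, if_pos (show ((r : Int) < (pos : Int)) by exact_mod_cast h1)]
      cases hb : pvBestB c pos t with
      | none => simp [pvCombB]
      | some q =>
        simp only [Option.map_some]
        by_cases h2 : q.2 > r
        · rw [if_pos h2]
          simp only [Option.map_some, pvCombB]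
          rw [if_pos (by push_cast; omega)]
          simp; omega
        · rw [if_neg h2]
          simp only [Option.map_some, pvCombB]
          rw [if_neg (by push_cast; omega)]
          simp
    · by_cases h0 : r = pos
      · subst h0
        rw [if_neg h1, if_pos (show (((r : Int)) == ((r : Int))) = true by simp)]
        cases pvBestB c r t <;> simp [pvCombB] <;> omega
      · have hne : ¬ (((r : Nat) : Int) == (pos : Int)) = true := by simp; omega
        rw [if_neg h1, if_neg hne, if_neg (show ¬ ((r : Int) < (pos : Int)) by push_cast; omega)]
        cases pvBestB c pos t <;> simp [pvCombB] <;> omega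

theorem pvBridgeA (c : List String) (pos : Nat) (h : String) (t : List String) (s : Int) :
    pvMapA c pos (h :: t) s = pvCombA (pvCandA c (pos : Int) (s, h)) (pvMapA c pos t (s + 1)) := by
  simp only [pvMapA, pvBestA, pvCandA]
  cases hidx : PySem.List.index? c h with
  | none =>
    cases pvBestA c pos t <;> simp [pvCombA] <;> omega
  | some r =>
    dsimp only
    by_cases h1 : pos < r
    · have hne : ¬ (((r : Nat) : Int) == (pos : Int)) = true := by simp; omega
      rw [if_pos h1, if_neg hne, if_neg (show ¬ ((r : Int) < (pos : Int)) by push_cast; omega)]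
      cases hb : pvBestA c pos t with
      | none => simp [pvCombA]
      | some q =>
        simp only [Option.map_some]
        by_cases h2 : q.2 < r
        · rw [if_pos h2]
          simp only [Option.map_some, pvCombA]
          rw [if_pos (by push_cast; omega)]
          simp; omega
        · rw [if_neg h2]
          simp only [Option.map_some, pvCombA]
          rw [if_neg (by push_cast; omega)]
          simp
    · by_cases h0 : r = pos
      · subst h0
        rw [if_neg h1, if_pos (show (((r : Int)) == ((r : Int))) = true by simp)]
        cases pvBestA c r t <;> simp [pvCombA] <;> omega
      · have hne : ¬ (((r : Nat) : Int) == (pos : Int)) = true := by simp; omega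
        rw [if_neg h1, if_neg hne, if_pos (show ((r : Int) < (pos : Int)) by push_cast; omega)]
        cases pvBestA c pos t <;> simp [pvCombA] <;> omega

theorem pvFoldB_eq (c : List String) (d : PySem.Dict String Int)
    (hd : ∀ x, d.get? x = (PySem.List.index? c x).map (fun n => ((n : Nat) : Int)))
    (pos : Nat) (N : List String) (s : Int) (st : Option (Int × Int) × Option (Int × Int)) :
    (PySem.List.enumerate N s).foldl (pvStepB d (pos : Int)) st
      = (pvCombB st.1 (pvMapB c pos N s), pvCombA st.2 (pvMapA c pos N s)) := by
  induction N generalizing s st with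
  | nil =>
    obtain ⟨a, b⟩ := st
    simp only [PySem.List.enumerate, pvMapB, pvMapA, pvBestB, pvBestA]
    cases a <;> cases b <;> simp [pvCombB, pvCombA]
  | cons h t ih =>
    rw [PySem.List.enumerate_cons, List.foldl_cons, pvStepB_eq c d hd, ih,
      pvBridgeB, pvBridgeA, pvCombB_assoc, pvCombA_assoc]

theorem pvLastFilterRange (p : Nat → Bool) (n : Nat) :
    (((List.range n).filter p).getLast? = none → ∀ r, r < n → p r = false)
    ∧ (∀ r, ((List.range n).filter p).getLast? = some r →
        r < n ∧ p r = true ∧ ∀ r', r < r' → r' < n → p r' = false) := by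
  induction n with
  | zero => simp
  | succ m ih =>
    rw [List.range_succ, List.filter_append]
    by_cases hp : p m = true
    · simp only [List.filter_cons, hp, if_true, List.filter_nil]
      rw [List.getLast?_concat]
      constructor
      · intro h; simp at h
      · intro r hr
        simp only [Option.some_inj] at hr
        subst hr
        exact ⟨Nat.lt_succ_self m, hp, fun r' h1 h2 => by omega⟩
    · have hp' : p m = false := by simpa using hp
      simp only [List.filter_cons, hp', Bool.false_eq_true, if_false, List.filter_nil,
        List.append_nil]
      refine ⟨fun h r hr => ?_, fun r hr => ?_⟩
      · rcases Nat.lt_succ_iff_lt_or_eq.mp hr with h' | h'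
        · exact ih.1 h r h'
        · subst h'; exact hp'
      · obtain ⟨h1, h2, h3⟩ := ih.2 r hr
        refine ⟨by omega, h2, fun r' hlt hlt' => ?_⟩
        rcases Nat.lt_succ_iff_lt_or_eq.mp hlt' with h' | h'
        · exact h3 r' hlt h'
        · subst h'; exact hp'

theorem pvHeadFilterRange' (p : Nat → Bool) (n : Nat) : ∀ (a : Nat),
    (((List.range' a n).filter p).head? = none → ∀ r, a ≤ r → r < a + n → p r = false)
    ∧ (∀ r, ((List.range' a n).filter p).head? = some r →
        a ≤ r ∧ r < a + n ∧ p r = true ∧ ∀ r', a ≤ r' → r' < r → p r' = false) := by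
  induction n with
  | zero => intro a; simp; omega
  | succ m ih =>
    intro a
    rw [List.range'_succ, List.filter_cons]
    by_cases hp : p a = true
    · simp only [hp, if_true, List.head?_cons]
      refine ⟨fun h => by simp at h, fun r hr => ?_⟩
      simp only [Option.some_inj] at hr
      subst hr
      exact ⟨le_refl a, by omega, hp, fun r' h1 h2 => by omega⟩
    · have hp' : p a = false := by simpa using hp
      simp only [hp', Bool.false_eq_true, if_false]
      refine ⟨fun h r hr1 hr2 => ?_, fun r hr => ?_⟩
      · rcases Nat.eq_or_lt_of_le hr1 with h' | h'
        · subst h'; exact hp'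
        · exact (ih (a + 1)).1 h r h' (by omega)
      · obtain ⟨h1, h2, h3, h4⟩ := (ih (a + 1)).2 r hr
        refine ⟨by omega, by omega, h3, fun r' hle hlt => ?_⟩
        rcases Nat.eq_or_lt_of_le hle with h' | h'
        · subst h'; exact hp'
        · exact h4 r' h' hlt

theorem pvGetD_eq_iff (c : List String) (hnd : c.Nodup) {h : String} {r rh : Nat}
    (hr : r < c.length) (hidx : PySem.List.index? c h = some rh) :
    c.getD r "" = h ↔ r = rh := by
  obtain ⟨hk, hch, _⟩ := PySem.List.getElem_of_index?_eq_some hidx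
  rw [List.getD_eq_getElem c "" hr]
  constructor
  · intro he
    exact (List.Nodup.getElem_inj_iff hnd).mp (by rw [he, hch])
  · intro he; subst he; exact hch

theorem pvGetD_ne (c : List String) {h : String} {r : Nat}
    (hnm : h ∉ c) (hr : r < c.length) : c.getD r "" ≠ h := by
  rw [List.getD_eq_getElem c "" hr]
  intro he
  exact hnm (he ▸ List.getElem_mem hr)

theorem pvBestB_cases (c : List String) (pos : Nat) (h : String) (t : List String) :
    pvBestB c pos (h :: t)
      = match PySem.List.index? c h with
        | none => (pvBestB c pos t).map (fun q => (q.1 + 1, q.2))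
        | some r =>
          if r < pos then
            match (pvBestB c pos t).map (fun q => (q.1 + 1, q.2)) with
            | none => some (0, r)
            | some q => if q.2 > r then some q else some (0, r)
          else (pvBestB c pos t).map (fun q => (q.1 + 1, q.2)) := rfl

theorem pvBestA_cases (c : List String) (pos : Nat) (h : String) (t : List String) :
    pvBestA c pos (h :: t)
      = match PySem.List.index? c h with
        | none => (pvBestA c pos t).map (fun q => (q.1 + 1, q.2))
        | some r =>
          if pos < r then
            match (pvBestA c pos t).map (fun q => (q.1 + 1, q.2)) with
            | none => some (0, r)
            | some q => if q.2 < r then some q else some (0, r)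
          else (pvBestA c pos t).map (fun q => (q.1 + 1, q.2)) := rfl

theorem pvBestB_spec (c : List String) (hnd : c.Nodup) (pos : Nat) (hpos : pos ≤ c.length)
    (N : List String) :
    (pvBestB c pos N = none → ∀ r, r < pos → c.getD r "" ∉ N)
    ∧ (∀ k r, pvBestB c pos N = some (k, r) →
        r < pos ∧ c.getD r "" ∈ N ∧ PySem.List.index? N (c.getD r "") = some k
        ∧ ∀ r', r < r' → r' < pos → c.getD r' "" ∉ N) := by
  induction N with
  | nil => simp [pvBestB]
  | cons h t ih =>
    have hmemr : ∀ r, r < pos → r < c.length := fun r hr => by omega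
    rw [pvBestB_cases]
    cases hidx : PySem.List.index? c h with
    | none =>
      have hnm : h ∉ c := (PySem.List.index?_eq_none_iff c h).mp hidx
      cases hmap : pvBestB c pos t with
      | none =>
        refine ⟨fun _ r hr hmem => ?_, fun k r hb => by simp at hb⟩
        rcases List.mem_cons.mp hmem with he | hmem'
        · exact pvGetD_ne c hnm (hmemr r hr) he
        · exact ih.1 hmap r hr hmem'
      | some q =>
        refine ⟨fun hb => by simp at hb, fun k r hb => ?_⟩
        obtain ⟨hq1, hq2, hq3, hq4⟩ := ih.2 q.1 q.2 hmap
        simp only [Option.map_some, Option.some_inj, Prod.mk.injEq] at hb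
        obtain ⟨hk1, hr1⟩ := hb
        subst hk1; subst hr1
        have hne : c.getD q.2 "" ≠ h := pvGetD_ne c hnm (hmemr q.2 hq1)
        refine ⟨hq1, List.mem_cons_of_mem h hq2, ?_, fun r' h1 h2 => ?_⟩
        · rw [PySem.List.index?_cons_of_ne t (fun he => hne he.symm), hq3]; rfl
        · intro hmem
          rcases List.mem_cons.mp hmem with he | hmem'
          · exact pvGetD_ne c hnm (hmemr r' h2) he
          · exact hq4 r' h1 h2 hmem'
    | some rh =>
      dsimp only
      have hch : c.getD rh "" = h := by
        obtain ⟨hk, hch, _⟩ := PySem.List.getElem_of_index?_eq_some hidx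
        rw [List.getD_eq_getElem c "" hk]; exact hch
      by_cases hlt : rh < pos
      · rw [if_pos hlt]
        cases hmap : pvBestB c pos t with
        | none =>
          refine ⟨fun hb => by simp at hb, fun k r hb => ?_⟩
          simp only [Option.map_none, Option.some_inj, Prod.mk.injEq] at hb
          obtain ⟨hk1, hr1⟩ := hb
          subst hk1; subst hr1
          refine ⟨hlt, by rw [hch]; exact List.mem_cons_self, ?_, fun r' h1 h2 => ?_⟩
          · rw [hch, PySem.List.index?_cons_self]
          · intro hmem
            rcases List.mem_cons.mp hmem with he | hmem'
            · have : r' = rh := (pvGetD_eq_iff c hnd (hmemr r' h2) hidx).mp he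
              omega
            · exact ih.1 hmap r' h2 hmem'
        | some q =>
          simp only [Option.map_some]
          obtain ⟨hq1, hq2, hq3, hq4⟩ := ih.2 q.1 q.2 hmap
          by_cases hgt : q.2 > rh
          · rw [if_pos hgt]
            refine ⟨fun hb => by simp at hb, fun k r hb => ?_⟩
            simp only [Option.some_inj, Prod.mk.injEq] at hb
            obtain ⟨hk1, hr1⟩ := hb
            subst hk1; subst hr1
            have hne : c.getD q.2 "" ≠ h := fun he => by
              have : q.2 = rh := (pvGetD_eq_iff c hnd (hmemr q.2 hq1) hidx).mp he
              omega
            refine ⟨hq1, List.mem_cons_of_mem h hq2, ?_, fun r' h1 h2 => ?_⟩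
            · rw [PySem.List.index?_cons_of_ne t (fun he => hne he.symm), hq3]; rfl
            · intro hmem
              rcases List.mem_cons.mp hmem with he | hmem'
              · have : r' = rh := (pvGetD_eq_iff c hnd (hmemr r' h2) hidx).mp he
                omega
              · exact hq4 r' h1 h2 hmem'
          · rw [if_neg hgt]
            refine ⟨fun hb => by simp at hb, fun k r hb => ?_⟩
            simp only [Option.some_inj, Prod.mk.injEq] at hb
            obtain ⟨hk1, hr1⟩ := hb
            subst hk1; subst hr1
            refine ⟨hlt, by rw [hch]; exact List.mem_cons_self, ?_, fun r' h1 h2 => ?_⟩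
            · rw [hch, PySem.List.index?_cons_self]
            · intro hmem
              rcases List.mem_cons.mp hmem with he | hmem'
              · have : r' = rh := (pvGetD_eq_iff c hnd (hmemr r' h2) hidx).mp he
                omega
              · exact hq4 r' (by omega) h2 hmem'
      · rw [if_neg hlt]
        have hne1 : ∀ r, r < pos → c.getD r "" ≠ h := fun r hr he => by
          have : r = rh := (pvGetD_eq_iff c hnd (hmemr r hr) hidx).mp he
          omega
        cases hmap : pvBestB c pos t with
        | none =>
          refine ⟨fun _ r hr hmem => ?_, fun k r hb => by simp at hb⟩
          rcases List.mem_cons.mp hmem with he | hmem'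
          · exact hne1 r hr he
          · exact ih.1 hmap r hr hmem'
        | some q =>
          refine ⟨fun hb => by simp at hb, fun k r hb => ?_⟩
          obtain ⟨hq1, hq2, hq3, hq4⟩ := ih.2 q.1 q.2 hmap
          simp only [Option.map_some, Option.some_inj, Prod.mk.injEq] at hb
          obtain ⟨hk1, hr1⟩ := hb
          subst hk1; subst hr1
          refine ⟨hq1, List.mem_cons_of_mem h hq2, ?_, fun r' h1 h2 => ?_⟩
          · rw [PySem.List.index?_cons_of_ne t (fun he => hne1 q.2 hq1 he.symm), hq3]; rfl
          · intro hmem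
            rcases List.mem_cons.mp hmem with he | hmem'
            · exact hne1 r' h2 he
            · exact hq4 r' h1 h2 hmem'

theorem pvBestA_spec (c : List String) (hnd : c.Nodup) (pos : Nat)
    (N : List String) :
    (pvBestA c pos N = none → ∀ r, pos < r → r < c.length → c.getD r "" ∉ N)
    ∧ (∀ k r, pvBestA c pos N = some (k, r) →
        pos < r ∧ r < c.length ∧ c.getD r "" ∈ N ∧ PySem.List.index? N (c.getD r "") = some k
        ∧ ∀ r', pos < r' → r' < r → c.getD r' "" ∉ N) := by
  induction N with
  | nil => simp [pvBestA]
  | cons h t ih =>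
    rw [pvBestA_cases]
    cases hidx : PySem.List.index? c h with
    | none =>
      have hnm : h ∉ c := (PySem.List.index?_eq_none_iff c h).mp hidx
      cases hmap : pvBestA c pos t with
      | none =>
        refine ⟨fun _ r hr hrl hmem => ?_, fun k r hb => by simp at hb⟩
        rcases List.mem_cons.mp hmem with he | hmem'
        · exact pvGetD_ne c hnm hrl he
        · exact ih.1 hmap r hr hrl hmem'
      | some q =>
        refine ⟨fun hb => by simp at hb, fun k r hb => ?_⟩
        obtain ⟨hq1, hq1l, hq2, hq3, hq4⟩ := ih.2 q.1 q.2 hmap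
        simp only [Option.map_some, Option.some_inj, Prod.mk.injEq] at hb
        obtain ⟨hk1, hr1⟩ := hb
        subst hk1; subst hr1
        have hne : c.getD q.2 "" ≠ h := pvGetD_ne c hnm hq1l
        refine ⟨hq1, hq1l, List.mem_cons_of_mem h hq2, ?_, fun r' h1 h2 => ?_⟩
        · rw [PySem.List.index?_cons_of_ne t (fun he => hne he.symm), hq3]; rfl
        · intro hmem
          rcases List.mem_cons.mp hmem with he | hmem'
          · exact pvGetD_ne c hnm (by omega) he
          · exact hq4 r' h1 h2 hmem'
    | some rh =>
      dsimp only
      obtain ⟨hrhl, hch', _⟩ := PySem.List.getElem_of_index?_eq_some hidx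
      have hch : c.getD rh "" = h := by rw [List.getD_eq_getElem c "" hrhl]; exact hch'
      by_cases hlt : pos < rh
      · rw [if_pos hlt]
        cases hmap : pvBestA c pos t with
        | none =>
          refine ⟨fun hb => by simp at hb, fun k r hb => ?_⟩
          simp only [Option.map_none, Option.some_inj, Prod.mk.injEq] at hb
          obtain ⟨hk1, hr1⟩ := hb
          subst hk1; subst hr1
          refine ⟨hlt, hrhl, by rw [hch]; exact List.mem_cons_self, ?_, fun r' h1 h2 => ?_⟩
          · rw [hch, PySem.List.index?_cons_self]
          · intro hmem
            rcases List.mem_cons.mp hmem with he | hmem'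
            · have : r' = rh := (pvGetD_eq_iff c hnd (by omega) hidx).mp he
              omega
            · exact ih.1 hmap r' h1 (by omega) hmem'
        | some q =>
          simp only [Option.map_some]
          obtain ⟨hq1, hq1l, hq2, hq3, hq4⟩ := ih.2 q.1 q.2 hmap
          by_cases hgt : q.2 < rh
          · rw [if_pos hgt]
            refine ⟨fun hb => by simp at hb, fun k r hb => ?_⟩
            simp only [Option.some_inj, Prod.mk.injEq] at hb
            obtain ⟨hk1, hr1⟩ := hb
            subst hk1; subst hr1
            have hne : c.getD q.2 "" ≠ h := fun he => by
              have : q.2 = rh := (pvGetD_eq_iff c hnd hq1l hidx).mp he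
              omega
            refine ⟨hq1, hq1l, List.mem_cons_of_mem h hq2, ?_, fun r' h1 h2 => ?_⟩
            · rw [PySem.List.index?_cons_of_ne t (fun he => hne he.symm), hq3]; rfl
            · intro hmem
              rcases List.mem_cons.mp hmem with he | hmem'
              · have : r' = rh := (pvGetD_eq_iff c hnd (by omega) hidx).mp he
                omega
              · exact hq4 r' h1 h2 hmem'
          · rw [if_neg hgt]
            refine ⟨fun hb => by simp at hb, fun k r hb => ?_⟩
            simp only [Option.some_inj, Prod.mk.injEq] at hb
            obtain ⟨hk1, hr1⟩ := hb
            subst hk1; subst hr1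
            refine ⟨hlt, hrhl, by rw [hch]; exact List.mem_cons_self, ?_, fun r' h1 h2 => ?_⟩
            · rw [hch, PySem.List.index?_cons_self]
            · intro hmem
              rcases List.mem_cons.mp hmem with he | hmem'
              · have : r' = rh := (pvGetD_eq_iff c hnd (by omega) hidx).mp he
                omega
              · exact hq4 r' h1 (by omega) hmem'
      · rw [if_neg hlt]
        have hne1 : ∀ r, pos < r → r < c.length → c.getD r "" ≠ h := fun r hr hrl he => by
          have : r = rh := (pvGetD_eq_iff c hnd hrl hidx).mp he
          omega
        cases hmap : pvBestA c pos t with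
        | none =>
          refine ⟨fun _ r hr hrl hmem => ?_, fun k r hb => by simp at hb⟩
          rcases List.mem_cons.mp hmem with he | hmem'
          · exact hne1 r hr hrl he
          · exact ih.1 hmap r hr hrl hmem'
        | some q =>
          refine ⟨fun hb => by simp at hb, fun k r hb => ?_⟩
          obtain ⟨hq1, hq1l, hq2, hq3, hq4⟩ := ih.2 q.1 q.2 hmap
          simp only [Option.map_some, Option.some_inj, Prod.mk.injEq] at hb
          obtain ⟨hk1, hr1⟩ := hb
          subst hk1; subst hr1
          refine ⟨hq1, hq1l, List.mem_cons_of_mem h hq2, ?_, fun r' h1 h2 => ?_⟩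
          · rw [PySem.List.index?_cons_of_ne t (fun he => hne1 q.2 hq1 hq1l he.symm), hq3]; rfl
          · intro hmem
            rcases List.mem_cons.mp hmem with he | hmem'
            · exact hne1 r' h1 (by omega) he
            · exact hq4 r' h1 h2 hmem'

theorem pvX1 (c : List String) (hnd : c.Nodup) (pos : Nat) (hpos : pos ≤ c.length)
    (N : List String) :
    pvBestB c pos N
      = (((List.range pos).filter (fun r => decide (c.getD r "" ∈ N))).getLast?).map
          (fun r => ((PySem.List.index? N (c.getD r "")).getD 0, r)) := by
  have hB := pvBestB_spec c hnd pos hpos N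
  have hR := pvLastFilterRange (fun r => decide (c.getD r "" ∈ N)) pos
  cases hL : pvBestB c pos N with
  | none =>
    cases hF : ((List.range pos).filter (fun r => decide (c.getD r "" ∈ N))).getLast? with
    | none => rfl
    | some r =>
      obtain ⟨h1, h2, _⟩ := hR.2 r hF
      exact absurd (of_decide_eq_true h2) (hB.1 hL r h1)
  | some p =>
    obtain ⟨h1, h2, h3, h4⟩ := hB.2 p.1 p.2 (by rw [hL])
    cases hF : ((List.range pos).filter (fun r => decide (c.getD r "" ∈ N))).getLast? with
    | none =>
      exact absurd h2 (by simpa using hR.1 hF p.2 h1)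
    | some r =>
      obtain ⟨hr1, hr2, hr3⟩ := hR.2 r hF
      have hrr : r = p.2 := by
        rcases Nat.lt_trichotomy r p.2 with hc | hc | hc
        · exact absurd h2 (by simpa using hr3 p.2 hc h1)
        · exact hc
        · exact absurd (of_decide_eq_true hr2) (h4 r hc hr1)
      subst hrr
      simp only [Option.map_some, Option.some_inj]
      rw [h3]
      rfl

theorem pvX2 (c : List String) (hnd : c.Nodup) (pos : Nat)
    (N : List String) :
    pvBestA c pos N
      = (((List.range' (pos + 1) (c.length - (pos + 1))).filter
            (fun r => decide (c.getD r "" ∈ N))).head?).map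
          (fun r => ((PySem.List.index? N (c.getD r "")).getD 0, r)) := by
  have hB := pvBestA_spec c hnd pos N
  have hR := pvHeadFilterRange' (fun r => decide (c.getD r "" ∈ N)) (c.length - (pos + 1)) (pos + 1)
  cases hL : pvBestA c pos N with
  | none =>
    cases hF : ((List.range' (pos + 1) (c.length - (pos + 1))).filter
        (fun r => decide (c.getD r "" ∈ N))).head? with
    | none => rfl
    | some r =>
      obtain ⟨h1, h2, h3, _⟩ := hR.2 r hF
      exact absurd (of_decide_eq_true h3) (hB.1 hL r (by omega) (by omega))
  | some p =>
    obtain ⟨h1, h1l, h2, h3, h4⟩ := hB.2 p.1 p.2 (by rw [hL])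
    cases hF : ((List.range' (pos + 1) (c.length - (pos + 1))).filter
        (fun r => decide (c.getD r "" ∈ N))).head? with
    | none =>
      exact absurd h2 (by simpa using hR.1 hF p.2 (by omega) (by omega))
    | some r =>
      obtain ⟨hr1, hr2, hr3, hr4⟩ := hR.2 r hF
      have hrr : r = p.2 := by
        rcases Nat.lt_trichotomy r p.2 with hc | hc | hc
        · exact absurd (of_decide_eq_true hr3) (h4 r (by omega) hc)
        · exact hc
        · exact absurd h2 (by simpa using hr4 p.2 (by omega) hc)
      subst hrr
      simp only [Option.map_some, Option.some_inj]
      rw [h3]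
      rfl

theorem pvContains_eq (N : List String) (x : String) :
    PySem.Set.contains (PySem.Set.ofList N) x = decide (x ∈ N) := by
  by_cases hx : x ∈ N
  · simp [hx, (PySem.Set.contains_iff (PySem.Set.ofList N) x).mpr
      ((PySem.Set.mem_ofList N x).mpr hx)]
  · simp only [hx, decide_false]
    rcases hb : PySem.Set.contains (PySem.Set.ofList N) x with _ | _
    · rfl
    · exact absurd ((PySem.Set.mem_ofList N x).mp
        ((PySem.Set.contains_iff (PySem.Set.ofList N) x).mp hb)) hx

theorem pvAFindBefore (c N : List String) (pos : Nat) :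
    (PySem.List.pyRange ((pos : Int) - 1) (-1) (-1)).find?
        (fun j => PySem.Set.contains (PySem.Set.ofList N) (PySem.List.pyGetD c j ""))
      = (((List.range pos).filter (fun r => decide (c.getD r "" ∈ N))).getLast?).map
          (fun r => ((r : Nat) : Int)) := by
  rw [PySem.List.pyRange_neg_one_eq_reverse,
    show ((-1 : Int) + 1) = 0 from rfl, show ((pos : Int) - 1 + 1) = (pos : Int) by ring,
    PySem.List.pyRange_zero_natCast, ← List.head?_filter, List.filter_reverse,
    List.head?_reverse, List.filter_map, List.getLast?_map]
  have hf : List.filter ((fun j => PySem.Set.contains (PySem.Set.ofList N)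
        (PySem.List.pyGetD c j "")) ∘ (fun k : Nat => (k : Int))) (List.range pos)
      = List.filter (fun r => decide (c.getD r "" ∈ N)) (List.range pos) :=
    List.filter_congr (fun r _ => by
      simp only [Function.comp_apply, PySem.List.pyGetD_natCast, pvContains_eq])
  rw [hf]

theorem pvAFindAfter (c N : List String) (pos : Nat) (hpos : pos < c.length) :
    (PySem.List.pyRange ((pos : Int) + 1) (PySem.List.len c) 1).find?
        (fun j => PySem.Set.contains (PySem.Set.ofList N) (PySem.List.pyGetD c j ""))
      = (((List.range' (pos + 1) (c.length - (pos + 1))).filter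
            (fun r => decide (c.getD r "" ∈ N))).head?).map (fun r => ((r : Nat) : Int)) := by
  rw [PySem.List.len_eq, PySem.List.pyRange_one,
    show (((c.length : Int)) - ((pos : Int) + 1)).toNat = c.length - (pos + 1) by omega,
    List.find?_map, List.range'_eq_map_range, List.filter_map, List.head?_map,
    ← List.head?_filter]
  have hpred : ((fun j => PySem.Set.contains (PySem.Set.ofList N) (PySem.List.pyGetD c j ""))
        ∘ (fun k : Nat => (pos : Int) + 1 + (k : Int)))
      = ((fun r => decide (c.getD r "" ∈ N)) ∘ (fun x : Nat => pos + 1 + x)) := by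
    funext k
    simp only [Function.comp_apply]
    rw [show ((pos : Int) + 1 + (k : Int)) = ((pos + 1 + k : Nat) : Int) by push_cast; ring,
      PySem.List.pyGetD_natCast, pvContains_eq]
  rw [hpred, Option.map_map]
  congr 1

theorem pvAnchorBeforeA_eq (c N : List String) (pos : Nat) :
    pvAnchorBeforeA N (PySem.Set.ofList N) c pos
      = match ((List.range pos).filter (fun r => decide (c.getD r "" ∈ N))).getLast? with
        | none => (-1 : Int)
        | some r => (((PySem.List.index? N (c.getD r "")).getD 0 : Nat) : Int) := by
  unfold pvAnchorBeforeA
  rw [pvAFindBefore]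
  cases ((List.range pos).filter (fun r => decide (c.getD r "" ∈ N))).getLast? with
  | none => rfl
  | some r => simp only [Option.map_some, PySem.List.pyGetD_natCast]

theorem pvAnchorAfterA_eq (c N : List String) (pos : Nat) (hpos : pos < c.length) :
    pvAnchorAfterA N (PySem.Set.ofList N) c pos
      = match ((List.range' (pos + 1) (c.length - (pos + 1))).filter
            (fun r => decide (c.getD r "" ∈ N))).head? with
        | none => none
        | some r => some (((PySem.List.index? N (c.getD r "")).getD 0 : Nat) : Int) := by
  unfold pvAnchorAfterA
  rw [pvAFindAfter c N pos hpos]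
  cases ((List.range' (pos + 1) (c.length - (pos + 1))).filter
      (fun r => decide (c.getD r "" ∈ N))).head? with
  | none => rfl
  | some r => simp only [Option.map_some, PySem.List.pyGetD_natCast]

-- ===== VERDICT (by name: the statement is the Claim_ definition above) =====
theorem compute_insert_index_for_missing_column_spec : Claim_equal_compute_insert_index_for_missing_column := by
  intro headers_ordered missing_header canonical_order _ hpre
  unfold Pre_compute_insert_index_for_missing_column at hpre
  unfold Spec_compute_insert_index_for_missing_column
  unfold compute_insert_index_for_missing_column compute_insert_index_for_missing_column_alt
  dsimp only
  rw [pvRank_get]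
  cases hm : PySem.List.index? canonical_order missing_header with
  | none => simp only [Option.map_none]
  | some pos =>
    obtain ⟨hpos, _, _⟩ := PySem.List.getElem_of_index?_eq_some hm
    have hpre : canonical_order.Nodup := by
      rcases hpre with hnm | hnd
      · exact absurd ((PySem.List.index?_isSome_iff canonical_order missing_header).mp
          (by rw [hm]; rfl)) hnm
      · exact hnd
    simp only [Option.map_some]
    set N := headers_ordered.map (fun h => PySem.Str.strip h)
    rw [pvFoldB_eq canonical_order _ (pvRank_get canonical_order) pos N 0 (none, none)]
    rw [pvAnchorBeforeA_eq, pvAnchorAfterA_eq canonical_order N pos hpos]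
    have e1 : pvCombB ((none, none) : Option (Int × Int) × Option (Int × Int)).1
        (pvMapB canonical_order pos N 0) = pvMapB canonical_order pos N 0 := rfl
    have e2 : pvCombA ((none, none) : Option (Int × Int) × Option (Int × Int)).2
        (pvMapA canonical_order pos N 0) = pvMapA canonical_order pos N 0 := rfl
    rw [e1, e2]
    unfold pvMapB pvMapA
    rw [pvX1 canonical_order hpre pos (by omega) N, pvX2 canonical_order hpre pos N]
    cases hb : ((List.range pos).filter
        (fun r => decide (canonical_order.getD r "" ∈ N))).getLast? with
    | some r =>
      simp only [Option.map_some]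
      rw [if_pos (by positivity)]
      omega
    | none =>
      simp only [Option.map_none]
      rw [if_neg (by omega)]
      cases hh : ((List.range' (pos + 1) (canonical_order.length - (pos + 1))).filter
          (fun r => decide (canonical_order.getD r "" ∈ N))).head? with
      | some r =>
        simp only [Option.map_some]
        omega
      | none =>
        simp only [Option.map_none]
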